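-- pv_equiv track=rewrite | github.com/AleksandarLukic96/02180_Belief_Revision_Agent | utils.py | divide_sentence
-- ===== SOURCE A (Python) =====
-- def surrounded(sentence):
--     if sentence[0] != '(':
--         return False
--     open = 0
--     for i in range(len(sentence)):
--         character = sentence[i]
--         if character == '(':
--             open += 1
--         elif character == ')':
--             open -= 1
--         if open == 0 and i < len(sentence)-1:
--             return False
--     return True
--
-- def divide_sentence(sentence):
--     open = 0
--     indices = []
--
--     for i in range(len(sentence)):
--         character = sentence[i]
--         if character == '(':
--             open += 1
--         elif character == ')':
--             open -= 1
--         elif (character == '&' or character == '|') and open == 0: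
--             indices.append(i)
--
--
--     clauses = []
--     cur = 0
--     for i in range(len(indices)):
--         next = indices[i]
--         if surrounded(sentence[cur:next]):
--             clauses.append(sentence[cur+1:next-1])
--         else:
--             clauses.append(sentence[cur:next])
--         clauses.append(sentence[next])
--         cur = next+1
--     next = len(sentence)
--
--     clauses.append(sentence[cur:next])
--     return clauses
-- ===== SOURCE B (Python) =====
-- # B: precompute a prefix-balance array once; split points and the "fully
-- # parenthesised" test are then pure lookups into it -- no stateful depth scan
-- # and no separate surrounded() helper re-scanning each segment.
-- def divide_sentence(sentence):
--     n = len(sentence)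
--     bal = [0] * (n + 1)
--     for k in range(n):
--         bal[k + 1] = bal[k] + (sentence[k] == '(') - (sentence[k] == ')')
--     cuts = [i for i in range(n) if sentence[i] in '&|' and bal[i] == 0]
--     clauses = []
--     start = 0
--     for i in cuts:
--         seg = sentence[start:i]
--         if seg.startswith('(') and all(bal[k] != bal[start] for k in range(start + 1, i)):
--             seg = seg[1:-1]
--         clauses.append(seg)
--         clauses.append(sentence[i])
--         start = i + 1
--     clauses.append(sentence[start:])
--     return clauses
-- ===== Notes on version B (the rewrite author's own statement) =====
-- stated objective: alternative
-- what changed: B precomputes a prefix-balance array in one pass and then derives everything from it by lookups: the split points become a filtered comprehension over indices (bal[i]==0 and an operator char), and A's separate surrounded() depth-rescan of each segment is replaced by checking that no interior prefix balance equals the segment's starting balance.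
import Mathlib
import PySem

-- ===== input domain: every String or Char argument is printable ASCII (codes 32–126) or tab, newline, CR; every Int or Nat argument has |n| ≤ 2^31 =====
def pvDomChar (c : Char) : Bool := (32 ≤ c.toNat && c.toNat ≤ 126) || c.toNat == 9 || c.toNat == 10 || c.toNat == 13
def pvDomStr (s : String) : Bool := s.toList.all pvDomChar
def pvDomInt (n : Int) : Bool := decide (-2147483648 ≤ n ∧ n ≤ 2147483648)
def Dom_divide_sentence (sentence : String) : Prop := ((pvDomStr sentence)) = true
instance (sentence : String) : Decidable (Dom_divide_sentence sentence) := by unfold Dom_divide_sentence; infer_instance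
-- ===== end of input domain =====

-- B replaces A's stateful depth scans (index-collection loop plus the separate
-- surrounded() rescan of each segment) by one precomputed prefix-balance array
-- from which split points and the paren-wrapping test are pure lookups
-- (objective: alternative, same O(n) cost).

-- Python slice sentence[a:b] for 0 ≤ a, b (clamping), shared slicing primitive of both ports
def sliceN (l : List Char) (a b : Nat) : List Char := (l.take b).drop a

-- ===== PORT A =====
-- the `for i in range(len)` loop of `surrounded` with early return; `open` is o
def surrAuxA : List Char → Int → Bool
  | [], _ => true
  | c :: rest, o =>
    let o' := if c = '(' then o + 1 else if c = ')' then o - 1 else o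
    if o' = 0 ∧ rest ≠ [] then false else surrAuxA rest o'

def surroundedA (l : List Char) : Bool :=
  match l.head? with
  | none => false      -- Python raises IndexError on sentence[0] here; such calls are outside Pre_divide_sentence
  | some c => if c ≠ '(' then false else surrAuxA l 0

-- A's first loop: indices of top-level '&'/'|'; i is the running index, o the open count
def idxA : List Char → Nat → Int → List Nat
  | [], _, _ => []
  | c :: rest, i, o =>
    if c = '(' then idxA rest (i + 1) (o + 1)
    else if c = ')' then idxA rest (i + 1) (o - 1)
    else if (c = '&' ∨ c = '|') ∧ o = 0 then i :: idxA rest (i + 1) o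
    else idxA rest (i + 1) o

-- A's second loop over `indices`, with `cur`; ends with the unstripped final clause
def clausesA (full : List Char) : List Nat → Nat → List String
  | [], cur => [String.mk (sliceN full cur full.length)]
  | next :: rest, cur =>
    let seg := sliceN full cur next
    (if surroundedA seg then String.mk (sliceN full (cur + 1) (next - 1)) else String.mk seg)
      :: String.mk [full.getD next ' ']    -- sentence[next]: next < len always holds here
      :: clausesA full rest (next + 1)

def divide_sentence (sentence : String) : List String :=
  clausesA sentence.toList (idxA sentence.toList 0 0) 0

-- ===== PORT B =====
-- Source B's balance-filling loop: buildBal l b = [bal[0], …, bal[n]] starting from b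
def buildBal : List Char → Int → List Int
  | [], b => [b]
  | c :: rest, b =>
      b :: buildBal rest (b + (if c = '(' then 1 else 0) - (if c = ')' then 1 else 0))

-- Source B's `for i in cuts` loop; seg[1:-1] is drop 1 / dropLast, the wrap test is
-- `seg.startswith('(') and all(bal[k] != bal[start] for k in range(start+1, i))`
def bClauses (full : List Char) (bal : List Int) : List Nat → Nat → List String
  | [], start => [String.mk (sliceN full start full.length)]
  | i :: rest, start =>
    let seg := sliceN full start i
    let wrapped := (seg.headD ' ' == '(') &&
      ((List.range' (start + 1) (i - (start + 1))).all
        (fun k => !(bal.getD k 0 == bal.getD start 0)))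
    (if wrapped then String.mk ((seg.drop 1).dropLast) else String.mk seg)
      :: String.mk [full.getD i ' '] :: bClauses full bal rest (i + 1)

def divide_sentence_alt (sentence : String) : List String :=
  let l := sentence.toList
  let bal := buildBal l 0
  let cuts := (List.range l.length).filter
    (fun j => ((l.getD j ' ' == '&') || (l.getD j ' ' == '|')) && (bal.getD j 0 == 0))
  bClauses l bal cuts 0

-- ===== PRECONDITION & SPEC =====
-- i is a top-level '&'/'|' of l: prefix before i has balanced parentheses (open count 0)
def isTop (l : List Char) (i : Nat) : Bool :=
  ((l.getD i ' ' == '&') || (l.getD i ' ' == '|')) && ((l.take i).count '(' == (l.take i).count ')')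

-- Pre_ excludes exactly the inputs where A raises IndexError: a top-level operator at index 0
-- or immediately after another top-level operator makes A call surrounded on an empty segment.
def Pre_divide_sentence (sentence : String) : Prop :=
  ∀ i < sentence.toList.length,
    isTop sentence.toList i = true → 0 < i ∧ isTop sentence.toList (i - 1) = false
instance (sentence : String) : Decidable (Pre_divide_sentence sentence) := by
  unfold Pre_divide_sentence; infer_instance

def pvWitness_divide_sentence : String := "(a)&b|c"

def Spec_divide_sentence (sentence : String) (out : List String) : Prop := out = divide_sentence_alt sentence
instance (sentence : String) (out : List String) : Decidable (Spec_divide_sentence sentence out) := by unfold Spec_divide_sentence; infer_instance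

-- ===== CLAIM (what is proved, stated in full; the proofs are below) =====
def Claim_equal_divide_sentence : Prop := ∀ (sentence : String), Dom_divide_sentence sentence → Pre_divide_sentence sentence → Spec_divide_sentence sentence (divide_sentence sentence)

-- ===== LEMMAS AND PROOFS =====

-- prefix balance: #'(' − #')' among the first k characters
def pb (l : List Char) (k : Nat) : Int :=
  ((l.take k).count '(' : Int) - ((l.take k).count ')' : Int)

lemma pb_zero (l : List Char) : pb l 0 = 0 := by simp [pb]

lemma pb_cons (c : Char) (rest : List Char) (k : Nat) :
    pb (c :: rest) (k + 1) =
      (if c = '(' then 1 else 0) - (if c = ')' then 1 else 0) + pb rest k := by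
  by_cases h1 : c = '('
  · subst h1; simp [pb, List.take_succ_cons]; ring
  · by_cases h2 : c = ')'
    · subst h2; simp [pb, List.take_succ_cons, h1]; ring
    · simp [pb, List.take_succ_cons, List.count_cons, h1, h2]

lemma buildBal_getD (l : List Char) : ∀ (b : Int) (k : Nat), k ≤ l.length →
    (buildBal l b).getD k 0 = b + pb l k := by
  induction l with
  | nil =>
    intro b k hk
    simp only [List.length_nil, Nat.le_zero] at hk
    subst hk
    simp [buildBal, pb]
  | cons c rest ih =>
    intro b k hk
    cases k with
    | zero => simp [buildBal, pb]
    | succ k =>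
      rw [show buildBal (c :: rest) b
            = b :: buildBal rest (b + (if c = '(' then 1 else 0) - (if c = ')' then 1 else 0))
          from rfl,
        List.getD_cons_succ, ih _ k (by simpa using hk), pb_cons]
      ring

lemma drop_succ_of_drop {full : List Char} {i : Nat} {c : Char} {rest : List Char}
    (h : full.drop i = c :: rest) : full.drop (i + 1) = rest := by
  have : full.drop (i + 1) = (full.drop i).drop 1 := by rw [List.drop_drop]
  rw [this, h]; rfl

lemma getD_of_drop {full : List Char} {i : Nat} {c : Char} {rest : List Char}
    (h : full.drop i = c :: rest) : full.getD i ' ' = c := by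
  have hidx : full[i]? = some c := by rw [← List.head?_drop, h]; rfl
  simp [List.getD, hidx]

lemma len_of_drop {full : List Char} {i : Nat} {c : Char} {rest : List Char}
    (h : full.drop i = c :: rest) : i < full.length := by
  have := congrArg List.length h
  simp [List.length_drop] at this
  omega

lemma pb_add (full : List Char) (i j : Nat) :
    pb full (i + j) = pb full i + pb (full.drop i) j := by
  simp only [pb, List.take_add, List.count_append]
  push_cast; ring

lemma pb_succ (full : List Char) (i : Nat) (c : Char) (rest : List Char)
    (h : full.drop i = c :: rest) :
    pb full (i + 1) = pb full i + (if c = '(' then 1 else 0) - (if c = ')' then 1 else 0) := by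
  have h2 : pb (c :: rest) 1 = (if c = '(' then 1 else 0) - (if c = ')' then 1 else 0) := by
    have h3 := pb_cons c rest 0
    rw [pb_zero] at h3
    simpa using h3
  have h1 := pb_add full i 1
  rw [h, h2] at h1
  rw [h1]; ring

lemma all_congr_mem {α : Type} (l : List α) (p q : α → Bool)
    (h : ∀ a ∈ l, p a = q a) : l.all p = l.all q := by
  induction l with
  | nil => rfl
  | cons a t ih =>
    rw [List.all_cons, List.all_cons, h a (by simp),
      ih (fun b hb => h b (by simp [hb]))]

lemma surrAux_spec (l : List Char) : ∀ o : Int,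
    surrAuxA l o = (List.range (l.length - 1)).all (fun m => !(o + pb l (m + 1) == 0)) := by
  induction l with
  | nil => intro o; simp [surrAuxA]
  | cons c rest ih =>
    intro o
    have hop : (if c = '(' then o + 1 else if c = ')' then o - 1 else o)
        = o + ((if c = '(' then 1 else 0) - (if c = ')' then 1 else 0)) := by
      by_cases h1 : c = '(' <;> by_cases h2 : c = ')' <;> simp [h1, h2] <;> ring
    have hpt : ∀ m : Nat,
        o + pb (c :: rest) (m + 1)
          = (o + ((if c = '(' then 1 else 0) - (if c = ')' then 1 else 0))) + pb rest m := by
      intro m; rw [pb_cons]; ring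
    cases rest with
    | nil => simp [surrAuxA]
    | cons d t =>
      have hL : surrAuxA (c :: d :: t) o
          = if (o + ((if c = '(' then 1 else 0) - (if c = ')' then 1 else 0))) = 0 then false
            else surrAuxA (d :: t) (o + ((if c = '(' then 1 else 0) - (if c = ')' then 1 else 0))) := by
        simp only [surrAuxA, hop]
        by_cases hz : (o + ((if c = '(' then 1 else 0) - (if c = ')' then 1 else 0))) = 0 <;>
          simp [hz]
      rw [hL]
      have hlen : (c :: d :: t).length - 1 = t.length + 1 := by simp
      rw [hlen, List.range_succ_eq_map, List.all_cons, List.all_map]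
      have h0 : (!(o + pb (c :: d :: t) (0 + 1) == 0))
          = !((o + ((if c = '(' then 1 else 0) - (if c = ')' then 1 else 0))) == 0) := by
        rw [hpt 0, pb_zero, add_zero]
      have hcomp : ((fun m => !(o + pb (c :: d :: t) (m + 1) == 0)) ∘ Nat.succ)
          = fun m => !((o + ((if c = '(' then 1 else 0) - (if c = ')' then 1 else 0)))
              + pb (d :: t) (m + 1) == 0) := by
        funext m
        simp only [Function.comp]
        rw [show Nat.succ m + 1 = (m + 1) + 1 from rfl, hpt (m + 1)]
      have ihe := ih (o + ((if c = '(' then 1 else 0) - (if c = ')' then 1 else 0)))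
      simp only [List.length_cons, Nat.add_sub_cancel] at ihe
      rw [h0, hcomp, ← ihe]
      by_cases hz : (o + ((if c = '(' then 1 else 0) - (if c = ')' then 1 else 0))) = 0
      · simp [hz]
      · have hb : ((o + ((if c = '(' then 1 else 0) - (if c = ')' then 1 else 0))) == 0) = false := by
          simp [hz]
        simp [hz, hb]

lemma slice_length (full : List Char) (start i : Nat) (h2 : i ≤ full.length) :
    (sliceN full start i).length = i - start := by
  simp [sliceN]; omega

lemma slice_take (full : List Char) (start i j : Nat) (h1 : start + j ≤ i) (_h2 : i ≤ full.length) :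
    (sliceN full start i).take j = (full.drop start).take j := by
  unfold sliceN
  rw [List.drop_take, List.take_take]
  congr 1
  omega

lemma pb_slice (full : List Char) (start i j : Nat) (hj : start + j ≤ i) (h2 : i ≤ full.length) :
    pb (sliceN full start i) j = pb full (start + j) - pb full start := by
  have h3 : pb (sliceN full start i) j = pb (full.drop start) j := by
    unfold pb
    rw [slice_take full start i j hj h2]
  rw [h3, pb_add full start j]
  ring

lemma wrapped_eq (full : List Char) (start i : Nat) (hsi : start ≤ i) (hin : i ≤ full.length) :
    (((sliceN full start i).headD ' ' == '(') &&
      ((List.range' (start + 1) (i - (start + 1))).all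
        (fun k => !((buildBal full 0).getD k 0 == (buildBal full 0).getD start 0))))
    = surroundedA (sliceN full start i) := by
  cases hE : sliceN full start i with
  | nil => simp [surroundedA]
  | cons c t =>
    have hlen : (c :: t).length = i - start := by
      rw [← hE]; exact slice_length full start i hin
    have hlt : start < i := by
      simp only [List.length_cons] at hlen
      omega
    by_cases hc : c = '('
    · subst hc
      have h1 : ((('(' :: t).headD ' ') == '(') = true := by simp
      rw [h1, Bool.true_and]
      have h2 : surroundedA ('(' :: t) = surrAuxA ('(' :: t) 0 := by
        simp [surroundedA]
      rw [h2, surrAux_spec, hlen]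
      rw [List.range'_eq_map_range, List.all_map]
      have hnum : i - start - 1 = i - (start + 1) := by omega
      rw [hnum]
      apply all_congr_mem
      intro m hm
      have hmlt : m < i - (start + 1) := List.mem_range.mp hm
      simp only [Function.comp]
      have e1 : (buildBal full 0).getD (start + 1 + m) 0 = pb full (start + 1 + m) := by
        rw [buildBal_getD full 0 _ (by omega)]; ring
      have e2 : (buildBal full 0).getD start 0 = pb full start := by
        rw [buildBal_getD full 0 start (by omega)]; ring
      have e3 : pb ('(' :: t) (m + 1) = pb full (start + (m + 1)) - pb full start := by
        rw [← hE]; exact pb_slice full start i (m + 1) (by omega) hin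
      rw [e1, e2, e3, zero_add]
      have hidx : start + (m + 1) = start + 1 + m := by omega
      rw [hidx]
      by_cases hab : pb full (start + 1 + m) = pb full start
      · simp [hab]
      · have hne : pb full (start + 1 + m) - pb full start ≠ 0 := by omega
        simp [hab, hne]
    · have h1 : (((c :: t).headD ' ') == '(') = false := by simp [hc]
      rw [h1, Bool.false_and]
      simp [surroundedA, hc]

lemma cuts_eq (full : List Char) : ∀ (l : List Char) (i : Nat), full.drop i = l →
    idxA l i (pb full i) =
      (List.range' i l.length).filter
        (fun j => ((full.getD j ' ' == '&') || (full.getD j ' ' == '|')) &&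
          ((buildBal full 0).getD j 0 == 0)) := by
  intro l
  induction l with
  | nil => intro i h; simp [idxA]
  | cons c rest ih =>
    intro i h
    have hrest : full.drop (i + 1) = rest := drop_succ_of_drop h
    have hC : full.getD i ' ' = c := getD_of_drop h
    have hilen : i < full.length := len_of_drop h
    have hδ : pb full (i + 1)
        = pb full i + (if c = '(' then 1 else 0) - (if c = ')' then 1 else 0) :=
      pb_succ full i c rest h
    have hbal : (buildBal full 0).getD i 0 = pb full i := by
      rw [buildBal_getD full 0 i (Nat.le_of_lt hilen)]; ring
    have hC' : full[i]?.getD ' ' = c := hC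
    have hbal' : (buildBal full 0)[i]?.getD 0 = pb full i := hbal
    rw [List.length_cons, List.range'_succ, List.filter_cons]
    by_cases h1 : c = '('
    · have hp : (((full.getD i ' ' == '&') || (full.getD i ' ' == '|')) &&
          ((buildBal full 0).getD i 0 == 0)) = false := by
        simp [hC', h1]
      rw [hp]
      simp only [Bool.false_eq_true, if_false]
      rw [show idxA (c :: rest) i (pb full i) = idxA rest (i + 1) (pb full i + 1) from by
        simp [idxA, h1]]
      have he : pb full i + 1 = pb full (i + 1) := by
        rw [hδ, h1]; simp
      rw [he]
      exact ih (i + 1) hrest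
    · by_cases h2 : c = ')'
      · have hp : (((full.getD i ' ' == '&') || (full.getD i ' ' == '|')) &&
            ((buildBal full 0).getD i 0 == 0)) = false := by
          simp [hC', h2]
        rw [hp]
        simp only [Bool.false_eq_true, if_false]
        rw [show idxA (c :: rest) i (pb full i) = idxA rest (i + 1) (pb full i - 1) from by
          simp [idxA, h1, h2]]
        have he : pb full i - 1 = pb full (i + 1) := by
          rw [hδ, h2]; simp
        rw [he]
        exact ih (i + 1) hrest
      · have he : pb full (i + 1) = pb full i := by
          rw [hδ, if_neg h1, if_neg h2]; ring
        by_cases h3 : (c = '&' ∨ c = '|') ∧ pb full i = 0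
        · have hp : (((full.getD i ' ' == '&') || (full.getD i ' ' == '|')) &&
              ((buildBal full 0).getD i 0 == 0)) = true := by
            rcases h3.1 with h4 | h4 <;> simp [hC', h4, hbal', h3.2]
          rw [hp]
          simp only [if_true]
          rw [show idxA (c :: rest) i (pb full i) = i :: idxA rest (i + 1) (pb full i) from by
            simp [idxA, h1, h2, h3]]
          rw [show pb full i = pb full (i + 1) from he.symm]
          rw [ih (i + 1) hrest]
        · have hp : (((full.getD i ' ' == '&') || (full.getD i ' ' == '|')) &&
              ((buildBal full 0).getD i 0 == 0)) = false := by
            by_cases h4 : c = '&' ∨ c = '|'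
            · have h5 : pb full i ≠ 0 := fun hz => h3 ⟨h4, hz⟩
              rcases h4 with h4 | h4 <;> simp [hC', h4, hbal', h5]
            · rw [not_or] at h4
              simp [hC', h4.1, h4.2]
          rw [hp]
          simp only [Bool.false_eq_true, if_false]
          rw [show idxA (c :: rest) i (pb full i) = idxA rest (i + 1) (pb full i) from by
            simp [idxA, h1, h2, h3]]
          rw [show pb full i = pb full (i + 1) from he.symm]
          exact ih (i + 1) hrest

lemma strip_eq (full : List Char) (start i : Nat) (hle : i ≤ full.length) (hlt : start < i) :
    ((sliceN full start i).drop 1).dropLast = sliceN full (start + 1) (i - 1) := by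
  unfold sliceN
  apply List.ext_getElem
  · simp [List.length_dropLast, List.length_drop, List.length_take]; omega
  · intro k h1 h2
    simp only [List.getElem_dropLast, List.getElem_drop, List.getElem_take]
    congr 1
    omega

lemma clauses_eq (full : List Char) : ∀ (cuts : List Nat) (start : Nat),
    List.Pairwise (· < ·) cuts → (∀ j ∈ cuts, start ≤ j ∧ j < full.length) →
    clausesA full cuts start = bClauses full (buildBal full 0) cuts start := by
  intro cuts
  induction cuts with
  | nil => intro start _ _; rfl
  | cons i rest ih =>
    intro start hpw hmem
    obtain ⟨hsi, hin⟩ := hmem i (by simp)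
    have hW := wrapped_eq full start i hsi (Nat.le_of_lt hin)
    simp only [clausesA, bClauses]
    rw [← hW]
    congr 1
    · by_cases hw : (((sliceN full start i).headD ' ' == '(') &&
        ((List.range' (start + 1) (i - (start + 1))).all
          (fun k => !((buildBal full 0).getD k 0 == (buildBal full 0).getD start 0)))) = true
      · have hlt : start < i := by
          by_contra hge
          have hnil : sliceN full start i = [] := by
            unfold sliceN
            rw [List.drop_eq_nil_iff]
            simp only [List.length_take]
            omega
          rw [hnil] at hw
          simp at hw
        rw [if_pos hw, if_pos hw,
          strip_eq full start i (Nat.le_of_lt hin) hlt]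
      · rw [if_neg hw, if_neg hw]
    · congr 1
      exact ih (i + 1) hpw.of_cons (fun j hj =>
        ⟨Nat.succ_le_of_lt (List.rel_of_pairwise_cons hpw hj),
         (hmem j (List.mem_cons_of_mem i hj)).2⟩)

lemma main_eq (s : String) : divide_sentence s = divide_sentence_alt s := by
  show clausesA s.toList (idxA s.toList 0 0) 0
      = bClauses s.toList (buildBal s.toList 0)
          ((List.range s.toList.length).filter
            (fun j => ((s.toList.getD j ' ' == '&') || (s.toList.getD j ' ' == '|')) &&
              ((buildBal s.toList 0).getD j 0 == 0))) 0
  have hc := cuts_eq s.toList s.toList 0 (by simp)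
  rw [pb_zero] at hc
  rw [hc, ← List.range_eq_range']
  apply clauses_eq
  · exact List.Pairwise.sublist List.filter_sublist List.pairwise_lt_range
  · intro j hj
    exact ⟨Nat.zero_le j, List.mem_range.mp (List.mem_of_mem_filter hj)⟩

-- ===== VERDICT (by name: the statement is the Claim_ definition above) =====
theorem divide_sentence_spec : Claim_equal_divide_sentence := by
  intro s _ _
  unfold Spec_divide_sentence
  exact main_eq s
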